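-- pv_equiv track=rewrite | github.com/centry-core/shared | tools/openapi_tools.py | _sanitize_mcp_tool_name
-- ===== SOURCE A (Python) =====
-- def _sanitize_mcp_tool_name(parts: list) -> str:
--     """Convert list of parts to camelCase."""
--     if not parts:
--         return ""
--
--     processed_parts = []
--     for i, part in enumerate(parts):
--         sub_parts = part.split('_')
--         if i == 0:
--             processed = sub_parts[0].lower() + ''.join(sp.capitalize() for sp in sub_parts[1:])
--         else:
--             processed = ''.join(sp.capitalize() for sp in sub_parts)
--         processed_parts.append(processed)
--
--     return ''.join(processed_parts)
-- ===== SOURCE B (Python) =====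
-- def _sanitize_mcp_tool_name(parts: list) -> str:
--     """Convert list of parts to camelCase."""
--     if not parts:
--         return ""
--     out = []
--     in_first = True
--     cap_next = False
--     for ch in "_".join(parts):
--         if ch == '_':
--             in_first = False
--             cap_next = True
--         elif in_first:
--             out.append(ch.lower())
--         elif cap_next:
--             out.append(ch.upper())
--             cap_next = False
--         else:
--             out.append(ch.lower())
--     return "".join(out)
-- ===== Notes on version B (the rewrite author's own statement) =====
-- stated objective: alternative
-- what changed: Replaces split('_')/capitalize() per part with a single character-level state machine over '_'.join(parts): one scan with in_first/cap_next flags decides per character whether to lower, upper or drop it, so no token lists are ever built.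
import Mathlib
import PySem

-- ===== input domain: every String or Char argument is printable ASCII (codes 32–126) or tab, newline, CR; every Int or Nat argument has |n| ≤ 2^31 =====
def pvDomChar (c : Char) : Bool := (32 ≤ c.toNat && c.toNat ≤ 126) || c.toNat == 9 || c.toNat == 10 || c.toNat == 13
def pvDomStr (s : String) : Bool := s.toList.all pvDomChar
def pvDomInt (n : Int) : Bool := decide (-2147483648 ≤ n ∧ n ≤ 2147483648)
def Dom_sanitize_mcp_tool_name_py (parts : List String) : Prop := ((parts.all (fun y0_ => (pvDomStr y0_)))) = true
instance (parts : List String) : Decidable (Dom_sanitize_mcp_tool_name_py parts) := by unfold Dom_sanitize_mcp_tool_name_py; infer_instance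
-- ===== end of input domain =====

-- B is a single character-level state machine over "_".join(parts) (no split, no capitalize);
-- equivalence of RETURN values is proved, neither program mutates its argument.

-- Python str.capitalize() on the ASCII domain: first char uppercased, rest lowercased (exact on ASCII).
def pyCapitalize (l : List Char) : List Char :=
  match l with
  | [] => []
  | c :: rest => PySem.Chars.upperChar c :: PySem.Chars.lower rest

-- ===== PORT A =====
-- body of A's loop for one (i, part); sub_parts[0] uses headD: splitOn never returns []
def procOneA (ip : Int × String) : List Char :=
  let sub := PySem.Chars.splitOn ip.2.toList ['_']
  if ip.1 = 0 then
    PySem.Chars.lower (sub.headD []) ++ ((sub.drop 1).map pyCapitalize).flatten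
  else
    (sub.map pyCapitalize).flatten

def sanitize_mcp_tool_name_py (parts : List String) : String :=
  if parts = [] then "" else
  let processed_parts :=
    (PySem.List.enumerate parts).foldl (fun acc ip => acc ++ [procOneA ip]) ([] : List (List Char))
  String.ofList processed_parts.flatten

-- ===== PORT B =====
-- one loop step of B's for-loop: state is (out, in_first, cap_next)
def stepB (st : List Char × Bool × Bool) (ch : Char) : List Char × Bool × Bool :=
  if ch = '_' then (st.1, false, true)
  else if st.2.1 then (st.1 ++ [PySem.Chars.lowerChar ch], st.2.1, st.2.2)
  else if st.2.2 then (st.1 ++ [PySem.Chars.upperChar ch], false, false)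
  else (st.1 ++ [PySem.Chars.lowerChar ch], false, false)

def sanitize_mcp_tool_name_py_alt (parts : List String) : String :=
  if parts = [] then "" else
  String.ofList ((PySem.Str.join "_" parts).toList.foldl stepB ([], true, false)).1

-- ===== PRECONDITION & SPEC =====
def Spec_sanitize_mcp_tool_name_py (parts : List String) (out : String) : Prop := out = sanitize_mcp_tool_name_py_alt parts
instance (parts : List String) (out : String) : Decidable (Spec_sanitize_mcp_tool_name_py parts out) := by unfold Spec_sanitize_mcp_tool_name_py; infer_instance

-- ===== CLAIM (what is proved, stated in full; the proofs are below) =====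
def Claim_equal_sanitize_mcp_tool_name_py : Prop := ∀ (parts : List String), Dom_sanitize_mcp_tool_name_py parts → Spec_sanitize_mcp_tool_name_py parts (sanitize_mcp_tool_name_py parts)

-- ===== LEMMAS AND PROOFS =====

-- structural split on '_' (proof-side model of splitOn · ['_'])
def splitU : List Char → List (List Char)
  | [] => [[]]
  | c :: rest =>
    if c = '_' then [] :: splitU rest
    else
      match splitU rest with
      | [] => [[c]]
      | t :: ts => (c :: t) :: ts

theorem splitU_ne_nil (l : List Char) : splitU l ≠ [] := by
  cases l with
  | nil => simp [splitU]
  | cons c rest =>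
    simp only [splitU]
    split
    · simp
    · split <;> simp

theorem splitOn_go_eq (fuel : Nat) (l cur : List Char) (acc : List (List Char))
    (h : l.length ≤ fuel) :
    PySem.Chars.splitOn.go ['_'] fuel l cur acc
      = acc.reverse ++ (splitU l).modifyHead (cur.reverse ++ ·) := by
  induction fuel generalizing l cur acc with
  | zero =>
    cases l with
    | nil => simp [PySem.Chars.splitOn.go, splitU]
    | cons c rest => simp at h
  | succ f ih =>
    cases l with
    | nil => simp [PySem.Chars.splitOn.go, splitU]
    | cons c rest =>
      rw [PySem.Chars.splitOn.go]
      simp only [List.length_cons] at h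
      by_cases hc : c = '_'
      · subst hc
        rw [if_pos (by simp [List.isPrefixOf])]
        have hdrop : List.drop (['_'] : List Char).length ('_' :: rest) = rest := rfl
        rw [hdrop, ih _ _ _ (by omega)]
        cases h' : splitU rest <;> simp [splitU, h']
      · rw [if_neg (by simp [List.isPrefixOf]; exact fun h => hc h.symm)]
        rw [ih _ _ _ (by omega)]
        simp only [splitU, if_neg hc]
        obtain ⟨t, ts, hts⟩ : ∃ t ts, splitU rest = t :: ts := by
          cases h' : splitU rest with
          | nil => exact absurd h' (splitU_ne_nil _)
          | cons t ts => exact ⟨t, ts, rfl⟩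
        simp [hts]

theorem splitOn_eq_splitU (l : List Char) :
    PySem.Chars.splitOn l ['_'] = splitU l := by
  rw [PySem.Chars.splitOn, splitOn_go_eq _ _ _ _ (by omega)]
  obtain ⟨t, ts, hts⟩ : ∃ t ts, splitU l = t :: ts := by
    cases h' : splitU l with
    | nil => exact absurd h' (splitU_ne_nil _)
    | cons t ts => exact ⟨t, ts, rfl⟩
  simp [hts]

-- splitting distributes over a '_' in the middle
theorem splitU_append (x y : List Char) :
    splitU (x ++ '_' :: y) = splitU x ++ splitU y := by
  induction x with
  | nil => simp [splitU]
  | cons c x' ih =>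
    by_cases hc : c = '_'
    · subst hc; simp [splitU, ih]
    · simp only [List.cons_append, splitU, if_neg hc, ih]
      obtain ⟨t, ts, hts⟩ : ∃ t ts, splitU x' = t :: ts := by
        cases h' : splitU x' with
        | nil => exact absurd h' (splitU_ne_nil _)
        | cons t ts => exact ⟨t, ts, rfl⟩
      simp [hts]

theorem splitU_intercalate (p : List Char) (ps : List (List Char)) :
    splitU (List.intercalate ['_'] (p :: ps)) = splitU p ++ ps.flatMap splitU := by
  induction ps generalizing p with
  | nil => simp [List.intercalate]
  | cons q qs ih =>
    have : List.intercalate ['_'] (p :: q :: qs) = p ++ '_' :: List.intercalate ['_'] (q :: qs) := by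
      simp [List.intercalate, List.intersperse]
    rw [this, splitU_append, ih]
    simp

-- the abstract state machine run (mirrors stepB's output component)
def run : Bool → Bool → List Char → List Char
  | _, _, [] => []
  | inF, capN, c :: rest =>
    if c = '_' then run false true rest
    else if inF then PySem.Chars.lowerChar c :: run inF capN rest
    else if capN then PySem.Chars.upperChar c :: run false false rest
    else PySem.Chars.lowerChar c :: run false false rest

theorem foldl_stepB (l : List Char) (acc : List Char) (f c : Bool) :
    (l.foldl stepB (acc, f, c)).1 = acc ++ run f c l := by
  induction l generalizing acc f c with
  | nil => simp [run]
  | cons ch rest ih =>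
    simp only [List.foldl_cons, stepB, run]
    by_cases h1 : ch = '_'
    · simp [h1, ih]
    · by_cases h2 : f
      · simp [h1, h2, ih]
      · by_cases h3 : c <;> simp [h1, h2, h3, ih]

-- run characterized through splitU (three mutually-referring facts, one induction)
theorem run_splitU (l : List Char) :
    run false true l = ((splitU l).map pyCapitalize).flatten
    ∧ run false false l
        = PySem.Chars.lower ((splitU l).headD [])
          ++ (((splitU l).drop 1).map pyCapitalize).flatten
    ∧ ∀ b, run true b l
        = PySem.Chars.lower ((splitU l).headD [])
          ++ (((splitU l).drop 1).map pyCapitalize).flatten := by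
  induction l with
  | nil => simp [run, splitU, pyCapitalize, PySem.Chars.lower]
  | cons c rest ih =>
    obtain ⟨ih1, ih2, ih3⟩ := ih
    obtain ⟨t, ts, hts⟩ : ∃ t ts, splitU rest = t :: ts := by
      cases h' : splitU rest with
      | nil => exact absurd h' (splitU_ne_nil _)
      | cons t ts => exact ⟨t, ts, rfl⟩
    by_cases hc : c = '_'
    · subst hc
      refine ⟨?_, ?_, fun b => ?_⟩ <;>
        simp [run, splitU, ih1, pyCapitalize, PySem.Chars.lower]
    · refine ⟨?_, ?_, fun b => ?_⟩
      · simp only [run, if_neg hc, Bool.false_eq_true, if_false, ih2, hts,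
          splitU, List.map_cons, List.flatten_cons, pyCapitalize]
        simp [PySem.Chars.lower]
      · simp only [run, if_neg hc, Bool.false_eq_true, if_false, ih2, hts, splitU]
        simp [PySem.Chars.lower]
      · simp only [run, if_neg hc, ih3, hts, splitU]
        simp [PySem.Chars.lower]

theorem flatten_map_flatten {α β : Type} (g : α → List (List β)) (l : List α) :
    (l.map g).flatten.flatten = (l.map (fun x => (g x).flatten)).flatten := by
  induction l with
  | nil => rfl
  | cons x xs ih => simp [ih]

theorem foldl_snoc {α β : Type} (f : α → β) (l : List α) (acc : List β) :
    l.foldl (fun a x => a ++ [f x]) acc = acc ++ l.map f := by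
  induction l generalizing acc with
  | nil => simp
  | cons x xs ih => simp [List.foldl_cons, ih]

theorem map_procOneA_pos (rest : List String) (s : Int) (hs : 1 ≤ s) :
    (PySem.List.enumerate rest s).map procOneA
      = rest.map (fun q => ((splitU q.toList).map pyCapitalize).flatten) := by
  induction rest generalizing s with
  | nil => simp [PySem.List.enumerate]
  | cons q qs ih =>
    rw [PySem.List.enumerate_cons, List.map_cons, List.map_cons, ih (s + 1) (by omega)]
    have hs0 : s ≠ 0 := by omega
    simp [procOneA, hs0, splitOn_eq_splitU]

-- ===== VERDICT (by name: the statement is the Claim_ definition above) =====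

theorem sanitize_mcp_tool_name_py_spec : Claim_equal_sanitize_mcp_tool_name_py := by
  intro parts _
  unfold Spec_sanitize_mcp_tool_name_py sanitize_mcp_tool_name_py sanitize_mcp_tool_name_py_alt
  cases parts with
  | nil => rfl
  | cons p rest =>
    simp only [if_neg (by simp : ¬(p :: rest = ([] : List String)))]
    rw [foldl_stepB _ [] true false, List.nil_append, (run_splitU _).2.2 false]
    rw [PySem.List.enumerate_cons, List.foldl_cons, List.nil_append, foldl_snoc,
      map_procOneA_pos rest (0 + 1) (by omega)]
    have hjoin : (PySem.Str.join "_" (p :: rest)).toList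
        = List.intercalate ['_'] ((p :: rest).map String.toList) := by
      simp [PySem.Str.toList_join, PySem.Chars.join]
    rw [hjoin]
    simp only [List.map_cons]
    rw [splitU_intercalate]
    obtain ⟨t, ts, hts⟩ : ∃ t ts, splitU p.toList = t :: ts := by
      cases h' : splitU p.toList with
      | nil => exact absurd h' (splitU_ne_nil _)
      | cons t ts => exact ⟨t, ts, rfl⟩
    simp only [procOneA, splitOn_eq_splitU, hts, List.cons_append,
      List.headD_cons, List.drop_one, List.tail_cons, List.flatten_cons,
      List.map_append, List.flatten_append]
    congr 1
    simp [List.flatMap_def, Function.comp_def, flatten_map_flatten]
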